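-- pv_equiv track=rewrite | github.com/nitaytech/DoCoGen | code/modeling/masking/masker.py | prepare_mlm_input_output
-- ===== SOURCE A (Python) =====
-- from typing import List, Union, Tuple, Dict
--
-- def prepare_mlm_input_output(splitted_text: List[str],
--                              mask: List[bool]) -> Tuple[List[str], List[str]]:
--     n = len(splitted_text)
--     i = 0
--     is_masked = False
--     mask_cnt = 0
--     non_mask_cnt = 0
--     input_words, output_words = [], []
--     while i < n:
--         while i < n and mask[i] == True:
--             is_masked = True
--             output_words.append(splitted_text[i])
--             i += 1
--         if is_masked:
--             input_words.append(f"<extra_id_{mask_cnt}>")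
--             mask_cnt += 1
--         while i < n and mask[i] == False:
--             is_masked = False
--             input_words.append(splitted_text[i])
--             i += 1
--         if not is_masked:
--             output_words.append(f"<extra_id_{non_mask_cnt}>")
--             non_mask_cnt += 1
--     return input_words, output_words
-- ===== SOURCE B (Python) =====
-- def prepare_mlm_input_output(splitted_text, mask):
--     n = len(splitted_text)
--     # First pass: run-length encode mask[0:n] as (value, length) pairs.
--     runs = []
--     for i in range(n):
--         v = mask[i]
--         if runs and runs[-1][0] == v:
--             runs[-1] = (v, runs[-1][1] + 1)
--         else:
--             runs.append((v, 1))
--     # Second pass: walk the runs, slicing the token span for each one.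
--     input_words, output_words = [], []
--     pos = 0
--     mask_cnt = 0
--     non_mask_cnt = 0
--     for is_masked, length in runs:
--         tokens = splitted_text[pos:pos + length]
--         pos += length
--         if is_masked:
--             output_words.extend(tokens)
--             input_words.append(f"<extra_id_{mask_cnt}>")
--             mask_cnt += 1
--         else:
--             input_words.extend(tokens)
--             output_words.append(f"<extra_id_{non_mask_cnt}>")
--             non_mask_cnt += 1
--     return input_words, output_words
-- ===== Notes on version B (the rewrite author's own statement) =====
-- stated objective: simpler
-- what changed: A's nested while-loops threading an is_masked flag are replaced by two flat passes: run-length encode the mask, then walk the runs with a running slice index emitting each token span and its sentinel.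
import Mathlib
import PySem

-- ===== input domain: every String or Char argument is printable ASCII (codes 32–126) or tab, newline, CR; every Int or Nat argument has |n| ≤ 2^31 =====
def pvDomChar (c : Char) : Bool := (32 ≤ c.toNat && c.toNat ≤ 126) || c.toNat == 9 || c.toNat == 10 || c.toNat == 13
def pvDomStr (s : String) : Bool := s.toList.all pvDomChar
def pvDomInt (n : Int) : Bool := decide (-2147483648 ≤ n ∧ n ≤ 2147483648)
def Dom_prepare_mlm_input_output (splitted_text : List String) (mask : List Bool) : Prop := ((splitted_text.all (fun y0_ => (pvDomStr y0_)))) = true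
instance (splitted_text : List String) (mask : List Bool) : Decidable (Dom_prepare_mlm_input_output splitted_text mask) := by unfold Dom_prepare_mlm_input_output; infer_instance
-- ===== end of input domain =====

-- B replaces A's nested while-loops by two flat passes (run-length encode the mask, then emit
-- each run from a slice); objective: simpler. Equivalence is about the RETURN value (no mutation).
-- Loops are encoded with a structural fuel argument; each iteration advances i by at least one, so
-- fuel = n never runs out (pvMain proves the value for every sufficient fuel), it only makes the
-- recursion structural.

-- ===== PORT A =====
-- f"<extra_id_{k}>" for the nonnegative counters (str(k) = decimal digits = Nat's toString)
def pvExtraId (k : Nat) : String := "<extra_id_" ++ toString k ++ ">"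

-- Python's mask[i] raises IndexError iff i ≥ len(mask); Pre_ below excludes exactly those inputs,
-- so inside Pre_ (i < n ≤ mask.length) the total `getD` indexing is exact.
-- inner loop `while i < n and mask[i] == True: is_masked = True; output_words.append(splitted_text[i]); i += 1`
def pvATrue (st : List String) (mask : List Bool) (n : Nat) :
    Nat → Nat → Bool → List String → Nat × Bool × List String
  | 0, i, isM, outW => (i, isM, outW)
  | fuel + 1, i, isM, outW =>
    if i < n ∧ mask.getD i false = true then
      pvATrue st mask n fuel (i + 1) true (outW ++ [st.getD i ""])
    else (i, isM, outW)

-- inner loop `while i < n and mask[i] == False: is_masked = False; input_words.append(splitted_text[i]); i += 1`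
def pvAFalse (st : List String) (mask : List Bool) (n : Nat) :
    Nat → Nat → Bool → List String → Nat × Bool × List String
  | 0, i, isM, inW => (i, isM, inW)
  | fuel + 1, i, isM, inW =>
    if i < n ∧ mask.getD i false = false then
      pvAFalse st mask n fuel (i + 1) false (inW ++ [st.getD i ""])
    else (i, isM, inW)

-- the outer `while i < n` loop; state (i, mask_cnt, non_mask_cnt, is_masked, input_words, output_words)
def pvAOuter (st : List String) (mask : List Bool) (n : Nat) :
    Nat → Nat → Nat → Nat → Bool → List String → List String → List String × List String
  | 0, _, _, _, _, inW, outW => (inW, outW)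
  | fuel + 1, i, mc, nmc, isM, inW, outW =>
    if i < n then
      let r1 := pvATrue st mask n n i isM outW
      let inW1 := if r1.2.1 then inW ++ [pvExtraId mc] else inW
      let mc1 := if r1.2.1 then mc + 1 else mc
      let r2 := pvAFalse st mask n n r1.1 r1.2.1 inW1
      let outW1 := if r2.2.1 then r1.2.2 else r1.2.2 ++ [pvExtraId nmc]
      let nmc1 := if r2.2.1 then nmc else nmc + 1
      pvAOuter st mask n fuel r2.1 mc1 nmc1 r2.2.1 r2.2.2 outW1
    else (inW, outW)

def prepare_mlm_input_output (splitted_text : List String) (mask : List Bool) :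
    List String × List String :=
  pvAOuter splitted_text mask splitted_text.length splitted_text.length 0 0 0 false [] []

-- ===== PORT B =====
-- first pass: run-length encode mask[0:n] as (value, length) pairs (reads mask[i] for i in range(n))
def pvBRuns (mask : List Bool) (n : Nat) :
    Nat → Nat → List (Bool × Nat) → List (Bool × Nat)
  | 0, _, runs => runs
  | fuel + 1, i, runs =>
    if i < n then
      let v := mask.getD i false
      let runs' :=
        match runs.getLast? with
        | some (w, c) => if w = v then runs.dropLast ++ [(v, c + 1)] else runs ++ [(v, 1)]
        | none => runs ++ [(v, 1)]
      pvBRuns mask n fuel (i + 1) runs'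
    else runs

-- second pass: for each run slice the token span and emit it plus the matching sentinel
def pvBEmit (st : List String) : List (Bool × Nat) → Nat → Nat → Nat → List String → List String →
    List String × List String
  | [], _, _, _, inW, outW => (inW, outW)
  | (isM, len) :: rest, pos, mc, nmc, inW, outW =>
    let tokens := PySem.List.slice st (some (pos : Int)) (some ((pos : Int) + (len : Int)))
    if isM then
      pvBEmit st rest (pos + len) (mc + 1) nmc (inW ++ [pvExtraId mc]) (outW ++ tokens)
    else
      pvBEmit st rest (pos + len) mc (nmc + 1) (inW ++ tokens) (outW ++ [pvExtraId nmc])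

def prepare_mlm_input_output_alt (splitted_text : List String) (mask : List Bool) :
    List String × List String :=
  pvBEmit splitted_text (pvBRuns mask splitted_text.length splitted_text.length 0 []) 0 0 0 [] []

-- ===== PRECONDITION & SPEC =====
-- Pre_ excludes exactly the inputs where Python A raises IndexError (mask shorter than the text);
-- B raises there too.
def Pre_prepare_mlm_input_output (splitted_text : List String) (mask : List Bool) : Prop :=
  splitted_text.length ≤ mask.length
instance (splitted_text : List String) (mask : List Bool) :
    Decidable (Pre_prepare_mlm_input_output splitted_text mask) := by
  unfold Pre_prepare_mlm_input_output; infer_instance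

def pvWitness_prepare_mlm_input_output : List String × List Bool :=
  (["a", "b", "c"], [false, true, true])

def Spec_prepare_mlm_input_output (splitted_text : List String) (mask : List Bool)
    (out : List String × List String) : Prop :=
  out = prepare_mlm_input_output_alt splitted_text mask
instance (splitted_text : List String) (mask : List Bool) (out : List String × List String) :
    Decidable (Spec_prepare_mlm_input_output splitted_text mask out) := by
  unfold Spec_prepare_mlm_input_output; infer_instance

-- ===== CLAIM =====
def Claim_equal_prepare_mlm_input_output : Prop :=
  ∀ (splitted_text : List String) (mask : List Bool),
    Dom_prepare_mlm_input_output splitted_text mask →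
    Pre_prepare_mlm_input_output splitted_text mask →
    Spec_prepare_mlm_input_output splitted_text mask (prepare_mlm_input_output splitted_text mask)

-- ===== LEMMAS AND PROOFS =====

-- length of the run of value v in mask starting at i (up to n)
def pvTakeLen (mask : List Bool) (n : Nat) (v : Bool) (i : Nat) : Nat :=
  if i < n ∧ mask.getD i false = v then pvTakeLen mask n v (i + 1) + 1 else 0
termination_by n - i
decreasing_by omega

lemma pvTakeLen_pos (mask : List Bool) (n : Nat) {v : Bool} {i : Nat}
    (hi : i < n) (hv : mask.getD i false = v) : 0 < pvTakeLen mask n v i := by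
  rw [pvTakeLen, if_pos ⟨hi, hv⟩]; omega

lemma pvTakeLen_zero (mask : List Bool) (n : Nat) {v : Bool} {i : Nat}
    (h : mask.getD i false ≠ v ∨ n ≤ i) : pvTakeLen mask n v i = 0 := by
  rw [pvTakeLen, if_neg (by rcases h with h | h <;> [exact fun hc => h hc.2; omega])]

lemma pvTakeLen_le (mask : List Bool) (n : Nat) (v : Bool) :
    ∀ i, pvTakeLen mask n v i ≤ n - i := by
  have H : ∀ d i, n - i ≤ d → pvTakeLen mask n v i ≤ n - i := by
    intro d
    induction d with
    | zero => intro i h; rw [pvTakeLen]; split <;> omega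
    | succ d ih =>
      intro i h
      rw [pvTakeLen]
      split
      · next hc => have := ih (i + 1) (by omega); omega
      · omega
  intro i; exact H (n - i) i le_rfl

lemma pvTakeLen_stop (mask : List Bool) (n : Nat) (v : Bool) :
    ∀ i, i + pvTakeLen mask n v i < n →
      mask.getD (i + pvTakeLen mask n v i) false ≠ v := by
  have H : ∀ d i, n - i ≤ d → i + pvTakeLen mask n v i < n →
      mask.getD (i + pvTakeLen mask n v i) false ≠ v := by
    intro d
    induction d with
    | zero =>
      intro i h hlt
      have h0 : pvTakeLen mask n v i = 0 := pvTakeLen_zero mask n (Or.inr (by omega))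
      rw [h0] at hlt
      omega
    | succ d ih =>
      intro i h hlt
      by_cases hc : i < n ∧ mask.getD i false = v
      · have ht : pvTakeLen mask n v i = pvTakeLen mask n v (i + 1) + 1 := by
          conv_lhs => rw [pvTakeLen]
          rw [if_pos hc]
        rw [ht] at hlt ⊢
        have := ih (i + 1) (by omega) (by omega)
        intro hv
        exact this (by
          rw [show i + 1 + pvTakeLen mask n v (i + 1) =
            i + (pvTakeLen mask n v (i + 1) + 1) from by omega]
          exact hv)
      · have h0 : pvTakeLen mask n v i = 0 := by rw [pvTakeLen, if_neg hc]
        rw [h0] at hlt ⊢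
        simp only [Nat.add_zero] at hlt ⊢
        intro hv
        exact hc ⟨hlt, hv⟩
  intro i; exact H (n - i) i le_rfl

lemma pvATrue_eq (st : List String) (mask : List Bool) (n : Nat) :
    ∀ fuel i isM outW, n - i ≤ fuel →
      pvATrue st mask n fuel i isM outW =
        (i + pvTakeLen mask n true i,
         (if pvTakeLen mask n true i = 0 then isM else true),
         outW ++ (List.range (pvTakeLen mask n true i)).map (fun k => st.getD (i + k) "")) := by
  intro fuel
  induction fuel with
  | zero =>
    intro i isM outW h
    have h0 : pvTakeLen mask n true i = 0 := pvTakeLen_zero mask n (Or.inr (by omega))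
    rw [pvATrue, h0]; simp
  | succ fuel ih =>
    intro i isM outW h
    rw [pvATrue]
    by_cases hc : i < n ∧ mask.getD i false = true
    · rw [if_pos hc, ih (i + 1) true (outW ++ [st.getD i ""]) (by omega)]
      have ht : pvTakeLen mask n true i = pvTakeLen mask n true (i + 1) + 1 := by
        conv_lhs => rw [pvTakeLen]
        rw [if_pos hc]
      rw [ht]
      refine Prod.ext (by omega) (Prod.ext (by simp) ?_)
      simp only [List.range_succ_eq_map, List.map_cons, List.map_map, Function.comp_def,
        Nat.add_zero, List.append_assoc, List.singleton_append]
      refine congrArg (fun l => _ ++ l) (congrArg (fun l => _ :: l) ?_)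
      apply List.map_congr_left
      intro k _
      congr 1
      omega
    · rw [if_neg hc, pvTakeLen, if_neg hc]; simp

lemma pvAFalse_eq (st : List String) (mask : List Bool) (n : Nat) :
    ∀ fuel i isM inW, n - i ≤ fuel →
      pvAFalse st mask n fuel i isM inW =
        (i + pvTakeLen mask n false i,
         (if pvTakeLen mask n false i = 0 then isM else false),
         inW ++ (List.range (pvTakeLen mask n false i)).map (fun k => st.getD (i + k) "")) := by
  intro fuel
  induction fuel with
  | zero =>
    intro i isM inW h
    have h0 : pvTakeLen mask n false i = 0 := pvTakeLen_zero mask n (Or.inr (by omega))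
    rw [pvAFalse, h0]; simp
  | succ fuel ih =>
    intro i isM inW h
    rw [pvAFalse]
    by_cases hc : i < n ∧ mask.getD i false = false
    · rw [if_pos hc, ih (i + 1) false (inW ++ [st.getD i ""]) (by omega)]
      have ht : pvTakeLen mask n false i = pvTakeLen mask n false (i + 1) + 1 := by
        conv_lhs => rw [pvTakeLen]
        rw [if_pos hc]
      rw [ht]
      refine Prod.ext (by omega) (Prod.ext (by simp) ?_)
      simp only [List.range_succ_eq_map, List.map_cons, List.map_map, Function.comp_def,
        Nat.add_zero, List.append_assoc, List.singleton_append]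
      refine congrArg (fun l => _ ++ l) (congrArg (fun l => _ :: l) ?_)
      apply List.map_congr_left
      intro k _
      congr 1
      omega
    · rw [if_neg hc, pvTakeLen, if_neg hc]; simp


-- the inner loops are always called with fuel n, which never runs out
lemma pvATrue_eqN (st : List String) (mask : List Bool) (n : Nat) (i : Nat) (isM : Bool)
    (outW : List String) :
    pvATrue st mask n n i isM outW =
      (i + pvTakeLen mask n true i,
       (if pvTakeLen mask n true i = 0 then isM else true),
       outW ++ (List.range (pvTakeLen mask n true i)).map (fun k => st.getD (i + k) "")) :=
  pvATrue_eq st mask n n i isM outW (by omega)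

lemma pvAFalse_eqN (st : List String) (mask : List Bool) (n : Nat) (i : Nat) (isM : Bool)
    (inW : List String) :
    pvAFalse st mask n n i isM inW =
      (i + pvTakeLen mask n false i,
       (if pvTakeLen mask n false i = 0 then isM else false),
       inW ++ (List.range (pvTakeLen mask n false i)).map (fun k => st.getD (i + k) "")) :=
  pvAFalse_eq st mask n n i isM inW (by omega)

-- the tokens A appends one by one are the slice B takes
lemma pvTok_eq (st : List String) :
    ∀ t i, i + t ≤ st.length →
      (List.range t).map (fun k => st.getD (i + k) "") = (st.drop i).take t := by
  intro t
  induction t with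
  | zero => simp
  | succ t ih =>
    intro i h
    have hi : i < st.length := by omega
    rw [List.drop_eq_getElem_cons hi, List.take_succ_cons, List.range_succ_eq_map]
    simp only [List.map_cons, List.map_map, Function.comp_def, Nat.add_zero]
    rw [List.getD_eq_getElem st "" hi]
    congr 1
    rw [← ih (i + 1) (by omega)]
    congr 1
    funext k
    congr 1
    omega

lemma pvAOuter_stop (st : List String) (mask : List Bool) (n : Nat) :
    ∀ fuel i mc nmc isM inW outW, ¬ i < n →
      pvAOuter st mask n fuel i mc nmc isM inW outW = (inW, outW) := by
  intro fuel i mc nmc isM inW outW h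
  cases fuel with
  | zero => rw [pvAOuter]
  | succ fuel => rw [pvAOuter, if_neg h]

lemma pvBRuns_stop (mask : List Bool) (n : Nat) :
    ∀ fuel i runs, ¬ i < n → pvBRuns mask n fuel i runs = runs := by
  intro fuel i runs h
  cases fuel with
  | zero => rw [pvBRuns]
  | succ fuel => rw [pvBRuns, if_neg h]

lemma pvBRuns_fuel (mask : List Bool) (n : Nat) :
    ∀ fuel fuel' i runs, n - i ≤ fuel → n - i ≤ fuel' →
      pvBRuns mask n fuel i runs = pvBRuns mask n fuel' i runs := by
  intro fuel
  induction fuel with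
  | zero =>
    intro fuel' i runs h _
    rw [pvBRuns_stop mask n 0 i runs (by omega), pvBRuns_stop mask n fuel' i runs (by omega)]
  | succ fuel ih =>
    intro fuel' i runs h h'
    by_cases hi : i < n
    · cases fuel' with
      | zero => omega
      | succ fuel' =>
        rw [pvBRuns, pvBRuns, if_pos hi, if_pos hi]
        exact ih fuel' (i + 1) _ (by omega) (by omega)
    · rw [pvBRuns_stop mask n _ i runs hi, pvBRuns_stop mask n _ i runs hi]

lemma pvBRuns_cons (mask : List Bool) (n : Nat) :
    ∀ fuel j r runs, runs ≠ [] →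
      pvBRuns mask n fuel j (r :: runs) = r :: pvBRuns mask n fuel j runs := by
  intro fuel
  induction fuel with
  | zero => intro j r runs _; rw [pvBRuns, pvBRuns]
  | succ fuel ih =>
    intro j r runs hne
    rcases runs with _ | ⟨y, ys⟩
    · exact absurd rfl hne
    by_cases hj : j < n
    · rcases hl : (y :: ys).getLast? with _ | ⟨w, c⟩
      · simp at hl
      rw [pvBRuns, pvBRuns, if_pos hj, if_pos hj]
      simp only [List.getLast?_cons_cons, List.dropLast_cons₂, hl]
      by_cases hw : w = mask.getD j false
      · simp only [if_pos hw]
        rw [List.cons_append, ih (j + 1) r _ (by simp)]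
      · simp only [if_neg hw]
        rw [List.cons_append, ih (j + 1) r _ (by simp)]
    · rw [pvBRuns, pvBRuns, if_neg hj, if_neg hj]

lemma pvBRuns_single (mask : List Bool) (n : Nat) :
    ∀ fuel j v c, n - j ≤ fuel →
      pvBRuns mask n fuel j [(v, c)] =
        (v, c + pvTakeLen mask n v j) :: pvBRuns mask n fuel (j + pvTakeLen mask n v j) [] := by
  intro fuel
  induction fuel with
  | zero =>
    intro j v c h
    have h0 : pvTakeLen mask n v j = 0 := pvTakeLen_zero mask n (Or.inr (by omega))
    rw [h0]
    simp only [Nat.add_zero]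
    rw [pvBRuns, pvBRuns]
  | succ fuel ih =>
    intro j v c h
    by_cases hj : j < n
    · conv_lhs => rw [pvBRuns]
      rw [if_pos hj]
      simp only [List.getLast?_singleton, List.dropLast_singleton, List.nil_append]
      by_cases hm : v = mask.getD j false
      · rw [if_pos hm, ← hm, ih (j + 1) v (c + 1) (by omega)]
        have ht : pvTakeLen mask n v j = pvTakeLen mask n v (j + 1) + 1 := by
          conv_lhs => rw [pvTakeLen]
          rw [if_pos ⟨hj, hm.symm⟩]
        rw [ht]
        refine List.cons_eq_cons.mpr ⟨Prod.ext rfl (by omega), ?_⟩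
        rw [pvBRuns_fuel mask n fuel (fuel + 1) _ [] (by omega) (by omega)]
        congr 1
        omega
      · rw [if_neg hm]
        have h0 : pvTakeLen mask n v j = 0 :=
          pvTakeLen_zero mask n (Or.inl (fun hh => hm hh.symm))
        rw [h0]
        simp only [Nat.add_zero]
        rw [List.singleton_append]
        rw [pvBRuns_cons mask n fuel (j + 1) (v, c) [(mask.getD j false, 1)] (by simp)]
        conv_rhs => rw [pvBRuns]
        rw [if_pos hj]
        simp
    · have h0 : pvTakeLen mask n v j = 0 := pvTakeLen_zero mask n (Or.inr (by omega))
      rw [h0]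
      simp only [Nat.add_zero]
      rw [pvBRuns_stop mask n _ j _ hj, pvBRuns_stop mask n _ j _ hj]

lemma pvBRuns_decomp (mask : List Bool) (n : Nat) {fuel j : Nat} (hj : j < n)
    (h : n - j ≤ fuel) :
    pvBRuns mask n fuel j [] =
      (mask.getD j false, pvTakeLen mask n (mask.getD j false) j) ::
        pvBRuns mask n fuel (j + pvTakeLen mask n (mask.getD j false) j) [] := by
  cases fuel with
  | zero => omega
  | succ fuel =>
    conv_lhs => rw [pvBRuns]
    rw [if_pos hj]
    simp only [List.getLast?_nil, List.nil_append]
    rw [pvBRuns_single mask n fuel (j + 1) (mask.getD j false) 1 (by omega)]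
    have ht : pvTakeLen mask n (mask.getD j false) j =
        pvTakeLen mask n (mask.getD j false) (j + 1) + 1 := by
      conv_lhs => rw [pvTakeLen]
      rw [if_pos ⟨hj, rfl⟩]
    rw [ht]
    refine List.cons_eq_cons.mpr ⟨Prod.ext rfl (by omega), ?_⟩
    rw [pvBRuns_fuel mask n fuel (fuel + 1) _ [] (by omega) (by omega)]
    congr 1
    omega

-- the slice B takes, in drop/take form
lemma pvSlice_eq (st : List String) (pos len : Nat) :
    PySem.List.slice st (some (pos : Int)) (some ((pos : Int) + (len : Int))) =
      (st.drop pos).take len :=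
  PySem.List.slice_natCast_add st pos len

lemma pvMain (st : List String) (mask : List Bool) :
    ∀ fuel i mc nmc inW outW, st.length - i ≤ fuel →
      pvAOuter st mask st.length fuel i mc nmc false inW outW =
        pvBEmit st (pvBRuns mask st.length st.length i []) i mc nmc inW outW := by
  intro fuel
  induction fuel with
  | zero =>
    intro i mc nmc inW outW h
    rw [pvAOuter, pvBRuns_stop mask st.length _ i [] (by omega), pvBEmit]
  | succ fuel ih =>
    intro i mc nmc inW outW h
    by_cases hi : i < st.length
    · rw [pvAOuter, if_pos hi]
      rw [pvBRuns_decomp mask st.length hi (by omega)]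
      simp only [pvATrue_eqN, pvAFalse_eqN]
      rcases hb : mask.getD i false with _ | _
      · -- mask[i] = False: A's true-loop is a no-op, its false-loop eats the run
        have h0 : pvTakeLen mask st.length true i = 0 :=
          pvTakeLen_zero mask st.length (Or.inl (by rw [hb]; simp))
        have hp := pvTakeLen_pos mask st.length hi hb
        have hle := pvTakeLen_le mask st.length false i
        have hne : ¬ pvTakeLen mask st.length false i = 0 := by omega
        rw [pvBEmit]
        simp only [h0, Nat.add_zero, List.range_zero, List.map_nil, List.append_nil,
          if_true, if_false, ite_self, Bool.false_eq_true, eq_false hne]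
        rw [pvSlice_eq, pvTok_eq st (pvTakeLen mask st.length false i) i (by omega)]
        exact ih _ _ _ _ _ (by omega)
      · -- mask[i] = True: A's true-loop eats the run, then its false-loop the following run
        have hp := pvTakeLen_pos mask st.length hi hb
        have hle := pvTakeLen_le mask st.length true i
        have hne : ¬ pvTakeLen mask st.length true i = 0 := by omega
        rw [pvBEmit]
        simp only [eq_false hne, if_true, if_false]
        rw [pvSlice_eq, pvTok_eq st (pvTakeLen mask st.length true i) i (by omega)]
        by_cases hend : i + pvTakeLen mask st.length true i < st.length
        · -- a false-run follows
          have hbf : mask.getD (i + pvTakeLen mask st.length true i) false = false := by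
            have hst := pvTakeLen_stop mask st.length true i hend
            rcases hX : mask.getD (i + pvTakeLen mask st.length true i) false with _ | _
            · rfl
            · exact absurd hX hst
          have hpf := pvTakeLen_pos mask st.length hend hbf
          have hlef := pvTakeLen_le mask st.length false (i + pvTakeLen mask st.length true i)
          have hnef : ¬ pvTakeLen mask st.length false
              (i + pvTakeLen mask st.length true i) = 0 := by omega
          rw [pvBRuns_decomp mask st.length hend (by omega), hbf]
          rw [pvBEmit]
          simp only [eq_false hnef, if_false, Bool.false_eq_true]
          rw [pvSlice_eq, pvTok_eq st _ (i + pvTakeLen mask st.length true i) (by omega)]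
          exact ih _ _ _ _ _ (by omega)
        · -- the masked run reaches the end of the text
          have h0f : pvTakeLen mask st.length false
              (i + pvTakeLen mask st.length true i) = 0 :=
            pvTakeLen_zero mask st.length (Or.inr (by omega))
          simp only [h0f, Nat.add_zero, List.range_zero, List.map_nil, List.append_nil,
            if_true]
          rw [pvAOuter_stop st mask st.length _ _ _ _ _ _ _ (by omega)]
          rw [pvBRuns_stop mask st.length _ _ [] (by omega), pvBEmit]
    · rw [pvAOuter, if_neg hi]
      rw [pvBRuns_stop mask st.length _ i [] hi, pvBEmit]

-- ===== VERDICT =====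
theorem prepare_mlm_input_output_spec : Claim_equal_prepare_mlm_input_output := by
  intro st mask _ _
  unfold Spec_prepare_mlm_input_output prepare_mlm_input_output prepare_mlm_input_output_alt
  exact pvMain st mask st.length 0 0 0 [] [] le_rfl
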